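-- pv_equiv track=rewrite | github.com/DancingOnAir/LeetcodePythonSolution | math/2139_minimum_moves_to_reach_target_score.py | minMoves1
-- ===== SOURCE A (Python) =====
-- def minMoves1(target: int, maxDoubles: int) -> int:
--     res = 0
--     while target > 1:
--         if target % 2 == 0 and maxDoubles > 0:
--             target >>= 1
--             maxDoubles -= 1
--         elif maxDoubles > 0:
--             target -= 1
--         else:
--             return res + target - 1
--         res += 1
--     return res
-- ===== SOURCE B (Python) =====
-- def minMoves1(target: int, maxDoubles: int) -> int:
--     if target <= 1:
--         return 0
--     d = max(0, min(maxDoubles, target.bit_length() - 1))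
--     low = target & ((1 << d) - 1)
--     return d + bin(low).count('1') + (target >> d) - 1
-- ===== Notes on version B (the rewrite author's own statement) =====
-- stated objective: faster
-- what changed: Replaced the step-by-step greedy loop over target with a closed-form bit formula: d = clamp of maxDoubles to the usable doublings, answer = d + popcount of the low d bits + (target >> d) - 1.
import Mathlib
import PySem

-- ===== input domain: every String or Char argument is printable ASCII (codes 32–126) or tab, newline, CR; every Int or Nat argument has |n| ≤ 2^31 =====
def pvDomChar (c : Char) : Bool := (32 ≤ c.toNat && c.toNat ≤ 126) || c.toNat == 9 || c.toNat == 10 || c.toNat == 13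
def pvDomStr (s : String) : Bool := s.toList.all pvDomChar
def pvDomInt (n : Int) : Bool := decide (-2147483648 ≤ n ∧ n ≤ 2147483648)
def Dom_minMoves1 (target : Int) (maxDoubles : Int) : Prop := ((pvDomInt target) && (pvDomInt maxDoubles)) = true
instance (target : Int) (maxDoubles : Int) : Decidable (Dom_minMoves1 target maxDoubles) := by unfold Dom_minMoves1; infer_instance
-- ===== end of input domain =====

-- B replaces A's per-step greedy loop with a closed-form bit formula (doublings + popcount of low bits + remaining increments); both are total.

-- ===== PORT A =====
-- A's while loop, step for step; `target >>= 1` on target > 1 is floor division by 2 (= `/` on positives).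
-- The Nat argument is only fuel making the recursion structural: each iteration strictly decreases
-- target.toNat, so with fuel = target.toNat the 0-fuel base is reached only when target ≤ 1,
-- where it returns res exactly as the loop's exit does.
def minMoves1LoopAux : Nat → Int → Int → Int → Int
  | 0, _, _, res => res
  | fuel + 1, target, maxDoubles, res =>
    if target > 1 then
      if target % 2 = 0 ∧ maxDoubles > 0 then
        minMoves1LoopAux fuel (target / 2) (maxDoubles - 1) (res + 1)
      else if maxDoubles > 0 then
        minMoves1LoopAux fuel (target - 1) maxDoubles (res + 1)
      else
        res + target - 1
    else res

def minMoves1 (target : Int) (maxDoubles : Int) : Int :=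
  minMoves1LoopAux target.toNat target maxDoubles 0

-- ===== PORT B =====
-- target.bit_length() of a nonnegative int; the first Nat is fuel (n halves each step, so fuel = n suffices)
def pyBitLengthAux : Nat → Nat → Nat
  | 0, _ => 0
  | fuel + 1, n => if n = 0 then 0 else pyBitLengthAux fuel (n / 2) + 1

def pyBitLength (n : Nat) : Nat := pyBitLengthAux n n

-- bin(low).count('1') of a nonnegative int, i.e. its popcount; same fuel scheme
def pyPopCountAux : Nat → Nat → Nat
  | 0, _ => 0
  | fuel + 1, n => if n = 0 then 0 else n % 2 + pyPopCountAux fuel (n / 2)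

def pyPopCount (n : Nat) : Nat := pyPopCountAux n n

-- closed form of Source B; on a positive target, `target & ((1<<d)-1)` is `% 2^d` and `target >> d` is `/ 2^d`
def minMoves1_alt (target : Int) (maxDoubles : Int) : Int :=
  if target ≤ 1 then 0
  else
    let d : Int := max 0 (min maxDoubles ((pyBitLength target.toNat : Int) - 1))
    let low : Nat := target.toNat % 2 ^ d.toNat
    d + (pyPopCount low : Int) + ((target.toNat / 2 ^ d.toNat : Nat) : Int) - 1

-- ===== PRECONDITION & SPEC =====
def Spec_minMoves1 (target : Int) (maxDoubles : Int) (out : Int) : Prop := out = minMoves1_alt target maxDoubles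
instance (target : Int) (maxDoubles : Int) (out : Int) : Decidable (Spec_minMoves1 target maxDoubles out) := by unfold Spec_minMoves1; infer_instance

-- ===== CLAIM (what is proved, stated in full; the proofs are below) =====
def Claim_equal_minMoves1 : Prop := ∀ (target : Int) (maxDoubles : Int), Dom_minMoves1 target maxDoubles → Spec_minMoves1 target maxDoubles (minMoves1 target maxDoubles)

-- ===== LEMMAS AND PROOFS =====

-- the body of B's positive branch, with the target as a Nat (proof helper)
def pvF (n : Nat) (md : Int) : Int :=
  max 0 (min md ((pyBitLength n : Int) - 1))
    + (pyPopCount (n % 2 ^ (max 0 (min md ((pyBitLength n : Int) - 1))).toNat) : Int)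
    + ((n / 2 ^ (max 0 (min md ((pyBitLength n : Int) - 1))).toNat : Nat) : Int) - 1

-- the same with the number of doublings as a Nat (proof helper)
def pvG (n k : Nat) : Int :=
  (k : Int) + (pyPopCount (n % 2 ^ k) : Int) + ((n / 2 ^ k : Nat) : Int) - 1

lemma pyBitLengthAux_zero (fuel : Nat) : pyBitLengthAux fuel 0 = 0 := by
  cases fuel <;> simp [pyBitLengthAux]

lemma pyBitLengthAux_irrel :
    ∀ (fuel fuel' n : Nat), n ≤ fuel → n ≤ fuel' → pyBitLengthAux fuel n = pyBitLengthAux fuel' n := by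
  intro fuel
  induction fuel with
  | zero =>
    intro fuel' n h h'
    have : n = 0 := by omega
    subst this
    rw [pyBitLengthAux_zero, pyBitLengthAux_zero]
  | succ fuel ih =>
    intro fuel' n h h'
    by_cases hn : n = 0
    · subst hn
      rw [pyBitLengthAux_zero, pyBitLengthAux_zero]
    · cases fuel' with
      | zero => omega
      | succ g =>
        simp only [pyBitLengthAux, if_neg hn]
        rw [ih g (n / 2) (by omega) (by omega)]

lemma pyBitLength_eq (n : Nat) : pyBitLength n = if n = 0 then 0 else pyBitLength (n / 2) + 1 := by
  by_cases hn : n = 0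
  · subst hn
    rw [if_pos rfl]
    exact pyBitLengthAux_zero 0
  · rw [if_neg hn]
    unfold pyBitLength
    cases n with
    | zero => omega
    | succ m =>
      simp only [pyBitLengthAux, if_neg hn]
      rw [pyBitLengthAux_irrel m ((m + 1) / 2) ((m + 1) / 2) (by omega) (by omega)]

lemma pyPopCountAux_zero (fuel : Nat) : pyPopCountAux fuel 0 = 0 := by
  cases fuel <;> simp [pyPopCountAux]

lemma pyPopCountAux_irrel :
    ∀ (fuel fuel' n : Nat), n ≤ fuel → n ≤ fuel' → pyPopCountAux fuel n = pyPopCountAux fuel' n := by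
  intro fuel
  induction fuel with
  | zero =>
    intro fuel' n h h'
    have : n = 0 := by omega
    subst this
    rw [pyPopCountAux_zero, pyPopCountAux_zero]
  | succ fuel ih =>
    intro fuel' n h h'
    by_cases hn : n = 0
    · subst hn
      rw [pyPopCountAux_zero, pyPopCountAux_zero]
    · cases fuel' with
      | zero => omega
      | succ g =>
        simp only [pyPopCountAux, if_neg hn]
        rw [ih g (n / 2) (by omega) (by omega)]

lemma pyPopCount_eq (n : Nat) : pyPopCount n = if n = 0 then 0 else n % 2 + pyPopCount (n / 2) := by
  by_cases hn : n = 0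
  · subst hn
    rw [if_pos rfl]
    exact pyPopCountAux_zero 0
  · rw [if_neg hn]
    unfold pyPopCount
    cases n with
    | zero => omega
    | succ m =>
      simp only [pyPopCountAux, if_neg hn]
      rw [pyPopCountAux_irrel m ((m + 1) / 2) ((m + 1) / 2) (by omega) (by omega)]

lemma pyBitLength_pos {n : Nat} (h : 1 ≤ n) : 1 ≤ pyBitLength n := by
  rw [pyBitLength_eq, if_neg (by omega : ¬ n = 0)]
  omega

lemma pyBitLength_half {n : Nat} (h : 2 ≤ n) : pyBitLength n = pyBitLength (n / 2) + 1 := by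
  conv_lhs => rw [pyBitLength_eq]
  rw [if_neg (by omega : ¬ n = 0)]

lemma pyBitLength_two_le {n : Nat} (h : 2 ≤ n) : 2 ≤ pyBitLength n := by
  rw [pyBitLength_half h]
  have := pyBitLength_pos (n := n / 2) (by omega)
  omega

lemma pyBitLength_pred {n : Nat} (h : 3 ≤ n) (ho : n % 2 = 1) :
    pyBitLength (n - 1) = pyBitLength n := by
  rw [pyBitLength_half (by omega), pyBitLength_half (by omega : 2 ≤ n)]
  have e : (n - 1) / 2 = n / 2 := by omega
  rw [e]

lemma pyPopCount_zero : pyPopCount 0 = 0 := by decide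

lemma pyPopCount_double (m : Nat) : pyPopCount (2 * m) = pyPopCount m := by
  by_cases hm : m = 0
  · subst hm; rfl
  · conv_lhs => rw [pyPopCount_eq]
    rw [if_neg (by omega : ¬ 2 * m = 0)]
    have e1 : 2 * m % 2 = 0 := by omega
    have e2 : 2 * m / 2 = m := by omega
    rw [e1, e2]
    omega

lemma pyPopCount_odd {r : Nat} (h : r % 2 = 1) : pyPopCount r = pyPopCount (r - 1) + 1 := by
  conv_lhs => rw [pyPopCount_eq]
  rw [if_neg (by omega : ¬ r = 0), h]
  by_cases h1 : r = 1
  · subst h1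
    simp [pyPopCount_zero]
  · have h3 : 3 ≤ r := by omega
    conv_rhs => rw [pyPopCount_eq]
    rw [if_neg (by omega : ¬ r - 1 = 0)]
    have e1 : (r - 1) % 2 = 0 := by omega
    have e2 : (r - 1) / 2 = r / 2 := by omega
    rw [e1, e2]
    omega

lemma pvF_one (md : Int) : pvF 1 md = 0 := by
  unfold pvF
  have hb : pyBitLength 1 = 1 := by decide
  rw [hb]
  have hd : max 0 (min md (((1 : Nat) : Int) - 1)) = 0 := by omega
  rw [hd]
  simp [pyPopCount_zero]

lemma alt_eq_F (t md : Int) (ht : 1 ≤ t) : minMoves1_alt t md = pvF t.toNat md := by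
  by_cases h1 : t ≤ 1
  · have he : t = 1 := le_antisymm h1 ht
    subst he
    rw [show ((1 : Int)).toNat = 1 from rfl, pvF_one]
    unfold minMoves1_alt
    rw [if_pos (le_refl (1 : Int))]
  · unfold minMoves1_alt
    rw [if_neg h1]
    rfl

lemma F_eq_G (n : Nat) (md : Int) (hn : 1 ≤ n) :
    pvF n md = pvG n (min md.toNat (pyBitLength n - 1)) := by
  have hb : 1 ≤ pyBitLength n := pyBitLength_pos hn
  have hd : max 0 (min md ((pyBitLength n : Int) - 1))
      = ((min md.toNat (pyBitLength n - 1) : Nat) : Int) := by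
    omega
  unfold pvF pvG
  rw [hd, Int.toNat_natCast]

lemma pvG_even (n k : Nat) (hn : 2 ≤ n) (he : n % 2 = 0) (hk : 1 ≤ k) :
    pvG n k = 1 + pvG (n / 2) (k - 1) := by
  obtain ⟨m, rfl⟩ : ∃ m, n = 2 * m := ⟨n / 2, by omega⟩
  obtain ⟨j, rfl⟩ : ∃ j, k = j + 1 := ⟨k - 1, by omega⟩
  have e1 : 2 * m / 2 = m := by omega
  have e2 : j + 1 - 1 = j := by omega
  rw [e1, e2]
  unfold pvG
  have hp : (2 : Nat) ^ (j + 1) = 2 * 2 ^ j := by ring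
  rw [hp, Nat.mul_mod_mul_left, pyPopCount_double, Nat.mul_div_mul_left _ _ (by norm_num : 0 < 2)]
  push_cast
  ring

lemma pvG_odd (n k : Nat) (ho : n % 2 = 1) (hk : 1 ≤ k) :
    pvG n k = 1 + pvG (n - 1) k := by
  have hp0 : 0 < 2 ^ k := pow_pos (by norm_num : (0:Nat) < 2) k
  have hdvd : 2 ∣ 2 ^ k := dvd_pow_self 2 (by omega)
  have hr2 : n % 2 ^ k % 2 = 1 := by rw [Nat.mod_mod_of_dvd n hdvd]; exact ho
  have hqr := Nat.div_add_mod n (2 ^ k)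
  have hrp : n % 2 ^ k < 2 ^ k := Nat.mod_lt _ hp0
  have hr1 : 1 ≤ n % 2 ^ k := by omega
  have hsplit : n - 1 = 2 ^ k * (n / 2 ^ k) + (n % 2 ^ k - 1) := by omega
  have hmod : (n - 1) % 2 ^ k = n % 2 ^ k - 1 := by
    rw [hsplit, Nat.mul_add_mod, Nat.mod_eq_of_lt (by omega)]
  have hdiv : (n - 1) / 2 ^ k = n / 2 ^ k := by
    rw [hsplit, Nat.mul_add_div hp0,
      Nat.div_eq_of_lt (by omega : n % 2 ^ k - 1 < 2 ^ k)]
    omega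
  have hpop : pyPopCount (n % 2 ^ k) = pyPopCount (n % 2 ^ k - 1) + 1 := pyPopCount_odd hr2
  unfold pvG
  rw [hmod, hdiv, hpop]
  push_cast
  ring

lemma alt_le_one (t md : Int) (h : t ≤ 1) : minMoves1_alt t md = 0 := by
  unfold minMoves1_alt
  rw [if_pos h]

lemma alt_noDoubles (t md : Int) (ht : 1 < t) (hm : md ≤ 0) : minMoves1_alt t md = t - 1 := by
  rw [alt_eq_F t md (by omega), F_eq_G _ _ (by omega)]
  have hk : min md.toNat (pyBitLength t.toNat - 1) = 0 := by omega
  rw [hk]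
  unfold pvG
  simp only [pow_zero, Nat.mod_one, Nat.div_one, pyPopCount_zero, Nat.cast_zero]
  omega

lemma alt_even (t md : Int) (ht : 1 < t) (hm : 0 < md) (he : t % 2 = 0) :
    minMoves1_alt t md = 1 + minMoves1_alt (t / 2) (md - 1) := by
  have h1 : (1 : Int) ≤ t / 2 := by omega
  rw [alt_eq_F t md (by omega), alt_eq_F _ _ h1]
  have hn : (t / 2).toNat = t.toNat / 2 := by omega
  rw [hn]
  have hn2 : 2 ≤ t.toNat := by omega
  have hne : t.toNat % 2 = 0 := by omega
  rw [F_eq_G _ _ (by omega), F_eq_G _ _ (by omega)]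
  have hb : pyBitLength t.toNat = pyBitLength (t.toNat / 2) + 1 := pyBitLength_half hn2
  have hb1 : 1 ≤ pyBitLength (t.toNat / 2) := pyBitLength_pos (by omega)
  have hk : min md.toNat (pyBitLength t.toNat - 1)
      = min (md - 1).toNat (pyBitLength (t.toNat / 2) - 1) + 1 := by
    rw [hb]; omega
  rw [hk, pvG_even _ _ hn2 hne (by omega)]
  rfl

lemma alt_odd (t md : Int) (ht : 1 < t) (hm : 0 < md) (ho : t % 2 = 1) :
    minMoves1_alt t md = 1 + minMoves1_alt (t - 1) md := by
  have h3 : (3 : Int) ≤ t := by omega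
  rw [alt_eq_F t md (by omega), alt_eq_F (t - 1) md (by omega)]
  have hn : (t - 1).toNat = t.toNat - 1 := by omega
  rw [hn]
  have hn3 : 3 ≤ t.toNat := by omega
  have hno : t.toNat % 2 = 1 := by omega
  rw [F_eq_G _ _ (by omega), F_eq_G _ _ (by omega)]
  have hb : pyBitLength (t.toNat - 1) = pyBitLength t.toNat := pyBitLength_pred hn3 hno
  rw [hb]
  have hb2 : 2 ≤ pyBitLength t.toNat := pyBitLength_two_le (by omega)
  exact pvG_odd _ _ hno (by omega)

lemma loopAux_eq :
    ∀ (fuel : Nat) (t md res : Int), t.toNat ≤ fuel →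
      minMoves1LoopAux fuel t md res = res + minMoves1_alt t md := by
  intro fuel
  induction fuel with
  | zero =>
    intro t md res h
    rw [alt_le_one t md (by omega)]
    simp [minMoves1LoopAux]
  | succ fuel ih =>
    intro t md res h
    simp only [minMoves1LoopAux]
    by_cases h1 : t > 1
    · rw [if_pos h1]
      by_cases h2 : t % 2 = 0 ∧ md > 0
      · rw [if_pos h2, ih _ _ _ (by omega), alt_even t md h1 h2.2 h2.1]
        omega
      · rw [if_neg h2]
        by_cases h3 : md > 0
        · rw [if_pos h3, ih _ _ _ (by omega), alt_odd t md h1 h3 (by omega)]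
          omega
        · rw [if_neg h3, alt_noDoubles t md h1 (by omega)]
          omega
    · rw [if_neg h1, alt_le_one t md (by omega)]
      omega

-- ===== VERDICT (by name: the statement is the Claim_ definition above) =====
theorem minMoves1_spec : Claim_equal_minMoves1 := by
  intro t md _
  unfold Spec_minMoves1 minMoves1
  rw [loopAux_eq t.toNat t md 0 (le_refl _)]
  omega
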